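-- pv_equiv track=rewrite | github.com/g-assismoraes/beecrowd | ESTRUTURAS E BIBLIOTECAS/1256.py | separaPorChaves
-- ===== SOURCE A (Python) =====
-- def separaPorChaves(bs, keys):
--     respostas = dict()
--     for i in range(bs):
--         respostas[i] = list()
--     for chave in respostas.keys():
--         listaAuxiliar = list()
--         for elemento in keys:
--             if elemento % bs == chave:
--                 listaAuxiliar.append(elemento)
--                 respostas[chave] = listaAuxiliar
--     return respostas
-- ===== SOURCE B (Python) =====
-- def separaPorChaves(bs, keys):
--     if bs <= 0:
--         return {}
--     buckets = {i: [] for i in range(bs)}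
--     for e in keys:
--         buckets[e % bs].append(e)
--     return buckets
-- ===== Notes on version B (the rewrite author's own statement) =====
-- stated objective: faster
-- what changed: Instead of scanning the whole key list once per bucket (bs passes), B builds the bs empty buckets once and distributes the keys in a single pass via buckets[e % bs].append(e).
import Mathlib
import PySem

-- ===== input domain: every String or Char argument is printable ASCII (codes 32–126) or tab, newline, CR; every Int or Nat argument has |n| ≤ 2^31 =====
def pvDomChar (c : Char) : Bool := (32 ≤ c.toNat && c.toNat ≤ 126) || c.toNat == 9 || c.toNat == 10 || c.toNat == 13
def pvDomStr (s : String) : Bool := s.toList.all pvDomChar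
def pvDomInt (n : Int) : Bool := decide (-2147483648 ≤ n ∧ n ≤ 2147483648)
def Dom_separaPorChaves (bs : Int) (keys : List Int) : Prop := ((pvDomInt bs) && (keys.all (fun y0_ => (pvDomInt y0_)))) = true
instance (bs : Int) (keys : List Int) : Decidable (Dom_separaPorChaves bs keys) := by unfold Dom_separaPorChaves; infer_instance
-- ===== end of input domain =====

-- B replaces A's per-bucket scan of the whole key list by a single distributing pass (asymptotically faster).
-- ===== PORT A =====
def separaPorChaves (bs : Int) (keys : List Int) : List (Int × List Int) :=
  let respostas0 : PySem.Dict Int (List Int) :=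
    (PySem.List.pyRange 0 bs 1).foldl (fun d i => d.insert i []) PySem.Dict.empty
  let respostas :=
    respostas0.keys.foldl (fun d chave =>
      (keys.foldl (fun (st : List Int × PySem.Dict Int (List Int)) elemento =>
          if PySem.Int.mod elemento bs == chave then
            ((st.1 ++ [elemento]), st.2.insert chave (st.1 ++ [elemento]))
          else st) ([], d)).2) respostas0
  respostas.items

-- ===== PORT B =====
def separaPorChaves_alt (bs : Int) (keys : List Int) : List (Int × List Int) :=
  if bs ≤ 0 then []
  else
    let buckets0 : PySem.Dict Int (List Int) :=
      (PySem.List.pyRange 0 bs 1).foldl (fun d i => d.insert i []) PySem.Dict.empty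
    (keys.foldl (fun d e => d.modify (PySem.Int.mod e bs) [] (fun xs => xs ++ [e])) buckets0).items

-- ===== PRECONDITION & SPEC =====
def Spec_separaPorChaves (bs : Int) (keys : List Int) (out : List (Int × List Int)) : Prop := out = separaPorChaves_alt bs keys
instance (bs : Int) (keys : List Int) (out : List (Int × List Int)) : Decidable (Spec_separaPorChaves bs keys out) := by unfold Spec_separaPorChaves; infer_instance

-- ===== CLAIM (what is proved, stated in full; the proofs are below) =====
def Claim_equal_separaPorChaves : Prop := ∀ (bs : Int) (keys : List Int), Dom_separaPorChaves bs keys → Spec_separaPorChaves bs keys (separaPorChaves bs keys)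

-- ===== LEMMAS AND PROOFS =====

-- the initial dict {i: [] for i in range(bs)}
def pvR0 (bs : Int) : PySem.Dict Int (List Int) :=
  (PySem.List.pyRange 0 bs 1).foldl (fun d i => d.insert i []) PySem.Dict.empty

lemma pvR0_keys (bs : Int) : (pvR0 bs).keys = PySem.List.pyRange 0 bs 1 := by
  unfold pvR0
  rw [PySem.Dict.keys_foldl_insert]
  simp only [PySem.Dict.keys_empty, PySem.Set.update_nil_left]
  exact PySem.Set.ofList_eq_self_of_nodup _ (PySem.List.nodup_pyRange_one 0 bs)

lemma pvFoldInsertNil_getD (L : List Int) (d : PySem.Dict Int (List Int))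
    (h : ∀ c, d.getD c [] = []) (c : Int) :
    (L.foldl (fun d i => d.insert i ([] : List Int)) d).getD c [] = [] := by
  induction L generalizing d with
  | nil => exact h c
  | cons a L ih =>
    refine ih _ (fun c' => ?_)
    rw [PySem.Dict.getD_insert]
    split <;> simp [h]

lemma pvR0_getD (bs c : Int) : (pvR0 bs).getD c [] = [] :=
  pvFoldInsertNil_getD _ _ (fun c' => by simp [PySem.Dict.getD_empty]) c

lemma pvR0_nodup (bs : Int) : (pvR0 bs).keys.Nodup := by
  rw [pvR0_keys]; exact PySem.List.nodup_pyRange_one 0 bs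

-- A's inner loop over 'keys' for a fixed bucket 'chave'
lemma pvInnerA (bs chave : Int) (l acc : List Int) (d : PySem.Dict Int (List Int)) :
    (l.foldl (fun (st : List Int × PySem.Dict Int (List Int)) elemento =>
        if PySem.Int.mod elemento bs == chave then
          ((st.1 ++ [elemento]), st.2.insert chave (st.1 ++ [elemento]))
        else st) (acc, d)).2
    = if l.filter (fun e => PySem.Int.mod e bs == chave) = [] then d
      else d.insert chave (acc ++ l.filter (fun e => PySem.Int.mod e bs == chave)) := by
  induction l generalizing acc d with
  | nil => simp
  | cons e l ih =>
    by_cases h : PySem.Int.mod e bs == chave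
    · simp only [List.foldl_cons, List.filter_cons, h, if_true, ih]
      split
      · next hf => simp [hf]
      · rw [PySem.Dict.insert_insert_self]; simp
    · simp only [List.foldl_cons, List.filter_cons, h, ih]
      simp

-- keys are unchanged by A's outer loop (every chave is already a key)
lemma pvOuterA_keys (bs : Int) (keys : List Int) (L : List Int) (d : PySem.Dict Int (List Int))
    (h : ∀ a ∈ L, d.contains a = true) :
    (L.foldl (fun d chave =>
      (keys.foldl (fun (st : List Int × PySem.Dict Int (List Int)) elemento =>
          if PySem.Int.mod elemento bs == chave then
            ((st.1 ++ [elemento]), st.2.insert chave (st.1 ++ [elemento]))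
          else st) ([], d)).2) d).keys = d.keys := by
  induction L generalizing d with
  | nil => rfl
  | cons a L ih =>
    rw [List.foldl_cons, pvInnerA]
    split
    · exact ih d (fun a' ha' => h a' (List.mem_cons_of_mem _ ha'))
    · rw [ih, PySem.Dict.keys_insert_of_contains _ _ (h a List.mem_cons_self)]
      intro a' ha'
      rw [PySem.Dict.contains_insert]
      simp [h a' (List.mem_cons_of_mem _ ha')]

-- value of A's outer loop at any bucket c
lemma pvOuterA_getD (bs : Int) (keys : List Int) (c : Int) (L : List Int)
    (d : PySem.Dict Int (List Int)) :
    (L.foldl (fun d chave =>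
      (keys.foldl (fun (st : List Int × PySem.Dict Int (List Int)) elemento =>
          if PySem.Int.mod elemento bs == chave then
            ((st.1 ++ [elemento]), st.2.insert chave (st.1 ++ [elemento]))
          else st) ([], d)).2) d).getD c []
    = if c ∈ L ∧ keys.filter (fun e => PySem.Int.mod e bs == c) ≠ [] then
        keys.filter (fun e => PySem.Int.mod e bs == c)
      else d.getD c [] := by
  induction L generalizing d with
  | nil => simp
  | cons a L ih =>
    rw [List.foldl_cons, pvInnerA, ih]
    by_cases hc : c ∈ L ∧ keys.filter (fun e => PySem.Int.mod e bs == c) ≠ []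
    · simp only [if_pos hc]
      have : c ∈ a :: L ∧ keys.filter (fun e => PySem.Int.mod e bs == c) ≠ [] :=
        ⟨List.mem_cons_of_mem _ hc.1, hc.2⟩
      rw [if_pos this]
    · simp only [if_neg hc]
      split
      · next hf =>
        rw [if_neg]
        intro hcon
        rcases List.mem_cons.mp hcon.1 with h1 | h1
        · subst h1; exact hcon.2 hf
        · exact hc ⟨h1, hcon.2⟩
      · next hf =>
        rw [PySem.Dict.getD_insert]
        by_cases hca : c = a
        · subst hca
          rw [if_pos rfl, if_pos ⟨List.mem_cons_self, hf⟩]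
          simp
        · rw [if_neg hca, if_neg]
          intro hcon
          rcases List.mem_cons.mp hcon.1 with h1 | h1
          · exact hca h1
          · exact hc ⟨h1, hcon.2⟩

-- B's loop, rewritten over (key, value) pairs
lemma pvB_pairs (bs : Int) (l : List Int) (d : PySem.Dict Int (List Int)) :
    l.foldl (fun d e => d.modify (PySem.Int.mod e bs) [] (fun xs => xs ++ [e])) d
    = (l.map (fun e => (PySem.Int.mod e bs, e))).foldl
        (fun d p => d.modify p.1 [] (fun xs => xs ++ [p.2])) d := by
  induction l generalizing d with
  | nil => rfl
  | cons e l ih => simp [ih]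

lemma pvPairs_filter (bs c : Int) (l : List Int) :
    ((l.map (fun e => (PySem.Int.mod e bs, e))).filter (fun p => p.1 == c)).map (·.2)
    = l.filter (fun e => PySem.Int.mod e bs == c) := by
  induction l with
  | nil => rfl
  | cons e l ih =>
    simp only [List.map_cons, List.filter_cons]
    by_cases h : PySem.Int.mod e bs == c
    · simp [h, ih]
    · simp [h, ih]

lemma pvMod_mem_range (bs e : Int) (hbs : 0 < bs) :
    PySem.Int.mod e bs ∈ PySem.List.pyRange 0 bs 1 := by
  rw [PySem.List.mem_pyRange_one, PySem.Int.mod_eq_emod_of_pos hbs]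
  exact ⟨Int.emod_nonneg e (by omega), Int.emod_lt_of_pos e hbs⟩

lemma pvB_keys (bs : Int) (keys : List Int) (hbs : 0 < bs) :
    (keys.foldl (fun d e => d.modify (PySem.Int.mod e bs) [] (fun xs => xs ++ [e]))
      (pvR0 bs)).keys = (pvR0 bs).keys := by
  rw [PySem.Dict.keys_foldl_modify_key, PySem.Set.update_eq_append_filter]
  rw [List.filter_eq_nil_iff.mpr, List.append_nil]
  intro y hy
  have hy' : y ∈ keys.map (fun e => PySem.Int.mod e bs) := (PySem.Set.mem_ofList _ _).mp hy
  rcases List.mem_map.mp hy' with ⟨e, _, rfl⟩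
  simp only [PySem.Set.contains_eq_listContains, Bool.not_eq_eq_eq_not, Bool.not_true,
    List.contains_eq_mem, decide_eq_false_iff_not]
  intro hmem
  rw [pvR0_keys] at hmem
  exact hmem (pvMod_mem_range bs e hbs)

-- ===== VERDICT (by name: the statement is the Claim_ definition above) =====
theorem separaPorChaves_spec : Claim_equal_separaPorChaves := by
  intro bs keys _
  unfold Spec_separaPorChaves separaPorChaves separaPorChaves_alt
  by_cases hbs : bs ≤ 0
  · rw [if_pos hbs]
    have hR : PySem.List.pyRange 0 bs 1 = [] := PySem.List.pyRange_one_eq_nil (by omega)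
    simp [hR, PySem.Dict.empty]
  · rw [if_neg hbs]
    replace hbs : 0 < bs := by omega
    show ((pvR0 bs).keys.foldl _ (pvR0 bs)).items = (keys.foldl _ (pvR0 bs)).items
    have hAkeys : ((pvR0 bs).keys.foldl (fun d chave =>
        (keys.foldl (fun (st : List Int × PySem.Dict Int (List Int)) elemento =>
            if PySem.Int.mod elemento bs == chave then
              ((st.1 ++ [elemento]), st.2.insert chave (st.1 ++ [elemento]))
            else st) ([], d)).2) (pvR0 bs)).keys = (pvR0 bs).keys := by
      apply pvOuterA_keys
      intro a ha
      rw [PySem.Dict.contains_iff_mem_keys]; exact ha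
    have hBkeys := pvB_keys bs keys hbs
    rw [PySem.Dict.items_eq_map_keys _ (by rw [hAkeys]; exact pvR0_nodup bs) [],
        PySem.Dict.items_eq_map_keys _ (by rw [hBkeys]; exact pvR0_nodup bs) []]
    rw [hAkeys, hBkeys]
    apply List.map_congr_left
    intro c hc
    rw [pvOuterA_getD, pvB_pairs, PySem.Dict.getD_foldl_modify_append, pvPairs_filter,
        pvR0_getD]
    by_cases hf : keys.filter (fun e => PySem.Int.mod e bs == c) = []
    · rw [if_neg (by intro h; exact h.2 hf)]
      simp [hf]
    · rw [if_pos ⟨hc, hf⟩]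
      simp
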